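-- pv_equiv track=rewrite | github.com/tommyriska/DAT234 | lastProject/scripts/getcombos.py | makecombos
-- ===== SOURCE A (Python) =====
-- import itertools
--
-- def makecombos(words, length_limit):
-- 	combos = []
--
-- 	for i in range(0, len(words)+1):
--
-- 		if i >= length_limit:
-- 			break
--
-- 		for subset in itertools.permutations(words, i):
-- 			combo = ""
-- 			for word in subset:
-- 				combo += str(word)
--
-- 			combos.append(combo)
-- 	return combos
-- ===== SOURCE B (Python) =====
-- def makecombos(words, length_limit):
--     out = []
--
--     def extend(prefix, remaining, need):
--         # emit every permutation of `need` words from `remaining`, already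
--         # concatenated onto `prefix`, in itertools' index order
--         if need == 0:
--             out.append(prefix)
--             return
--         for idx in range(len(remaining)):
--             extend(prefix + str(remaining[idx]),
--                    remaining[:idx] + remaining[idx + 1:],
--                    need - 1)
--
--     r = 0
--     while r < length_limit and r <= len(words):
--         extend("", list(words), r)
--         r += 1
--     return out
-- ===== Notes on version B (the rewrite author's own statement) =====
-- stated objective: alternative
-- what changed: Replaces the per-length itertools.permutations calls plus an inner join loop with a recursive backtracking generator that threads the growing prefix string and the list of still-unused words, emitting each combo directly.
import Mathlib
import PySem

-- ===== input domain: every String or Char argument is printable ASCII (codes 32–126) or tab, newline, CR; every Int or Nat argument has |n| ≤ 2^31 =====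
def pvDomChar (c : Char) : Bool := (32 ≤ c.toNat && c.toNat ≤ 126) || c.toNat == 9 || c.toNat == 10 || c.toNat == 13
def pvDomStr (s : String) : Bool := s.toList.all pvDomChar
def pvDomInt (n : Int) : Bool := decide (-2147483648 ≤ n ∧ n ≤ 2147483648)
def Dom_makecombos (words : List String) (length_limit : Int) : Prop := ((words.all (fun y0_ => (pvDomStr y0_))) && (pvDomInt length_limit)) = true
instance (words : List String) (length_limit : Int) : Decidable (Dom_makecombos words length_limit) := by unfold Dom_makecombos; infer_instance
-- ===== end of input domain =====

-- B replaces the per-length itertools.permutations + join loop with a recursive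
-- backtracking generator threading the concatenated prefix (alternative decomposition).

-- ===== PORT A =====
-- the for-loop over range(0, len(words)+1) with its break, appending the joined
-- permutations of each length; itertools.permutations is PySem.List.permutations
def makecombosLoopA (words : List String) (length_limit : Int) : List Int → List String → List String
  | [], combos => combos
  | i :: rest, combos =>
    if i ≥ length_limit then combos
    else makecombosLoopA words length_limit rest
      (combos ++ (PySem.List.permutations words i.toNat).map
        (fun subset => subset.foldl (fun combo word => combo ++ word) ""))

def makecombos (words : List String) (length_limit : Int) : List String :=
  makecombosLoopA words length_limit (PySem.List.pyRange 0 ((words.length : Int) + 1)) []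

-- ===== PORT B =====
-- B's recursive `extend`: emit every permutation of `need` words from `remaining`
-- concatenated onto `prefix`, choosing each remaining index in order
def makecombosExtend : String → List String → Nat → List String
  | pfx, _, 0 => [pfx]
  | pfx, remaining, need + 1 =>
    (List.range remaining.length).flatMap (fun idx =>
      match remaining[idx]? with
      | none => []
      | some w => makecombosExtend (pfx ++ w) (remaining.eraseIdx idx) need)

-- B's while loop: r = 0; while r < length_limit and r <= len(words)
def makecombosLoopB (words : List String) (length_limit : Int) (r : Nat) (out : List String) : List String :=
  if (r : Int) < length_limit ∧ r ≤ words.length then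
    makecombosLoopB words length_limit (r + 1) (out ++ makecombosExtend "" words r)
  else out
termination_by words.length + 1 - r

def makecombos_alt (words : List String) (length_limit : Int) : List String :=
  makecombosLoopB words length_limit 0 []

-- ===== PRECONDITION & SPEC =====
def Spec_makecombos (words : List String) (length_limit : Int) (out : List String) : Prop := out = makecombos_alt words length_limit
instance (words : List String) (length_limit : Int) (out : List String) : Decidable (Spec_makecombos words length_limit out) := by unfold Spec_makecombos; infer_instance

-- ===== CLAIM (what is proved, stated in full; the proofs are below) =====
def Claim_equal_makecombos : Prop := ∀ (words : List String) (length_limit : Int), Dom_makecombos words length_limit → Spec_makecombos words length_limit (makecombos words length_limit)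

-- ===== LEMMAS AND PROOFS =====

-- B's extend produces exactly the joined permutations of the requested length
lemma makecombosExtend_eq (need : Nat) : ∀ (rem : List String) (pfx : String),
    makecombosExtend pfx rem need =
      (PySem.List.permutations rem need).map
        (fun subset => subset.foldl (fun combo word => combo ++ word) pfx) := by
  induction need with
  | zero => intro rem pfx; simp [makecombosExtend, PySem.List.permutations]
  | succ n ih =>
    intro rem pfx
    simp only [makecombosExtend, PySem.List.permutations, List.map_flatMap]
    refine List.flatMap_congr (fun i _ => ?_)
    cases h : rem[i]? with
    | none => simp
    | some w => simp [ih, Function.comp_def]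

-- A's range loop starting at r agrees with B's while loop at counter r
lemma makecombos_loop_eq (words : List String) (L : Int) :
    ∀ (k r : Nat) (acc : List String), words.length + 1 - r ≤ k →
      makecombosLoopA words L (PySem.List.pyRange (r : Int) ((words.length : Int) + 1)) acc =
        makecombosLoopB words L r acc := by
  intro k
  induction k with
  | zero =>
    intro r acc hk
    rw [PySem.List.pyRange_one_eq_nil (by omega)]
    rw [makecombosLoopB]
    simp only [makecombosLoopA]
    rw [if_neg (by omega)]
  | succ k ih =>
    intro r acc hk
    by_cases hr : r ≤ words.length
    · have hlt : (r : Int) < (words.length : Int) + 1 := by push_cast; omega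
      rw [PySem.List.pyRange_one_cons hlt]
      simp only [makecombosLoopA]
      rw [makecombosLoopB]
      by_cases hL : (r : Int) ≥ L
      · rw [if_pos hL, if_neg (by omega)]
      · rw [if_neg hL, if_pos ⟨by omega, hr⟩]
        have : ((r : Int)).toNat = r := by omega
        rw [this, ← makecombosExtend_eq r words ""]
        have hcast : (r : Int) + 1 = (((r + 1 : Nat)) : Int) := by omega
        rw [hcast]
        exact ih (r + 1) _ (by omega)
    · rw [PySem.List.pyRange_one_eq_nil (by omega)]
      rw [makecombosLoopB]
      simp only [makecombosLoopA]
      rw [if_neg (by omega)]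

-- ===== VERDICT (by name: the statement is the Claim_ definition above) =====
theorem makecombos_spec : Claim_equal_makecombos := by
  intro words length_limit _
  unfold Spec_makecombos makecombos makecombos_alt
  have h := makecombos_loop_eq words length_limit (words.length + 1) 0 [] (by omega)
  simpa using h
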